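-- pv_equiv track=rewrite | github.com/wisewizardofthestars/FP-project-1 | FINAL.py | corrigir_palavra
-- ===== SOURCE A (Python) =====
-- def corrigir_palavra(string):
--     '''Função que recebe uma string que corresponde a uma palavra modificada
--     por um surto de letras e retorna essa palavra corrigida.
--     -Input de uma string que irá ser essa palavra modificada-string(nome da
--     variável)
--     -Retorna essa mesma string corrigida - string.
--     corrigir_palavra: cad. carateres--->cad. carateres
--     '''
--     cont=0
--     new_string=''
--     l_string=len(string)
--     while cont!=-1:
--
--         for i in range(0,l_string-1):
--             if abs(ord(string[i])-ord(string[i+1]))==32: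
--                 string=string[:i]+string[i+2:]
--                 l_string=len(string)
--                 break
--
--         if new_string==string:
--             cont=-1
--         new_string=string
--
--     return string
-- ===== SOURCE B (Python) =====
-- def corrigir_palavra(string):
--     stack = []
--     for c in string:
--         if stack and abs(ord(stack[-1]) - ord(c)) == 32:
--             stack.pop()
--         else:
--             stack.append(c)
--     return ''.join(stack)
-- ===== Notes on version B (the rewrite author's own statement) =====
-- stated objective: faster
-- what changed: Replaces the restart-from-scratch scan that removes one pair per full pass with a single-pass stack reduction that pops when the incoming char differs from the stack top by 32.
import Mathlib
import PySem

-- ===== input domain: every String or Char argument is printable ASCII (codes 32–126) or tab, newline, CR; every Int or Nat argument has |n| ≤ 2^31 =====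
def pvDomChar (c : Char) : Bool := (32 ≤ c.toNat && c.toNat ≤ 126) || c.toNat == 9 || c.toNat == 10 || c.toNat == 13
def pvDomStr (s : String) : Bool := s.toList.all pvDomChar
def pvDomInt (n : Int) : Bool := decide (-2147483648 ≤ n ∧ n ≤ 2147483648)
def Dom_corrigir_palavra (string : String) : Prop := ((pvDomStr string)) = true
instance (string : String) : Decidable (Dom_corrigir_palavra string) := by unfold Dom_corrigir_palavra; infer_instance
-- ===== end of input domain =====

-- B is a single-pass stack reduction replacing A's remove-first-pair-and-restart loop; same return value, no side effects.

-- ===== PORT A =====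
-- abs(ord(a)-ord(b)) == 32
def pvMatch (a b : Char) : Bool := ((a.toNat : Int) - (b.toNat : Int)).natAbs == 32

-- A's inner 'for i in range(0, l_string-1)': find the first adjacent pair differing
-- by 32 and return the string with that pair removed (string[:i] + string[i+2:]);
-- none means the pass found no pair.
def pvFindRemove : List Char → Option (List Char)
  | a :: b :: rest => if pvMatch a b then some rest else (pvFindRemove (b :: rest)).map (a :: ·)
  | _ => none

theorem pvFindRemove_length : ∀ (cs cs' : List Char), pvFindRemove cs = some cs' → cs'.length < cs.length := by
  intro cs
  induction cs with
  | nil => intro cs' h; simp [pvFindRemove] at h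
  | cons a t ih =>
    intro cs' h
    match t, h with
    | b :: rest, h =>
      by_cases hm : pvMatch a b
      · simp [pvFindRemove, hm] at h
        subst h; simp
      · simp [pvFindRemove, hm, Option.map_eq_some_iff] at h
        obtain ⟨u, hu, hcs⟩ := h
        have := ih u hu
        subst hcs; simp at this ⊢; omega

-- A's outer 'while cont != -1' loop: repeat the pass until a pass changes nothing.
def pvReduce (cs : List Char) : List Char :=
  match h : pvFindRemove cs with
  | some cs' => pvReduce cs'
  | none => cs
termination_by cs.length
decreasing_by exact pvFindRemove_length _ _ h

def corrigir_palavra (string : String) : String := String.mk (pvReduce string.toList)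

-- ===== PORT B =====
-- the stack, top at the head (Source B keeps the top at the end and joins in order,
-- hence the final reverse)
def pvStep (st : List Char) (c : Char) : List Char :=
  match st with
  | t :: ts => if pvMatch t c then ts else c :: t :: ts
  | [] => [c]

def corrigir_palavra_alt (string : String) : String :=
  String.mk ((string.toList.foldl pvStep []).reverse)

-- ===== PRECONDITION & SPEC =====
def Spec_corrigir_palavra (string : String) (out : String) : Prop := out = corrigir_palavra_alt string
instance (string : String) (out : String) : Decidable (Spec_corrigir_palavra string out) := by unfold Spec_corrigir_palavra; infer_instance

-- ===== CLAIM (what is proved, stated in full; the proofs are below) =====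
def Claim_equal_corrigir_palavra : Prop := ∀ (string : String), Dom_corrigir_palavra string → Spec_corrigir_palavra string (corrigir_palavra string)

-- ===== LEMMAS AND PROOFS =====

theorem pvFindRemove_cons_none (a b : Char) (r : List Char) :
    pvFindRemove (a :: b :: r) = none ↔ (pvMatch a b = false ∧ pvFindRemove (b :: r) = none) := by
  by_cases hm : pvMatch a b <;> simp [pvFindRemove, hm]

-- If a pass finds nothing in t :: cs, the fold just pushes everything.
theorem pv_fold_nomatch : ∀ (cs : List Char) (t : Char) (ts : List Char),
    pvFindRemove (t :: cs) = none → List.foldl pvStep (t :: ts) cs = cs.reverse ++ t :: ts := by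
  intro cs
  induction cs with
  | nil => intro t ts _; simp
  | cons c cs' ih =>
    intro t ts h
    obtain ⟨hm, hrest⟩ := (pvFindRemove_cons_none t c cs').mp h
    simp [List.foldl, pvStep, hm, ih c (t :: ts) hrest]

-- Removing a first-found pair does not change the fold result.
theorem pv_fold_remove : ∀ (p : List Char) (t : Char) (ts : List Char) (x y : Char) (r : List Char),
    pvMatch x y = true → pvFindRemove (t :: p ++ [x]) = none →
    List.foldl pvStep (t :: ts) (p ++ x :: y :: r) = List.foldl pvStep (t :: ts) (p ++ r) := by
  intro p
  induction p with
  | nil =>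
    intro t ts x y r hxy hn
    have hm : pvMatch t x = false := ((pvFindRemove_cons_none t x []).mp hn).1
    simp [List.foldl, pvStep, hm, hxy]
  | cons c p' ih =>
    intro t ts x y r hxy hn
    obtain ⟨hm, hrest⟩ := (pvFindRemove_cons_none t c (p' ++ [x])).mp (by simpa using hn)
    simp only [List.cons_append, List.foldl]
    rw [show pvStep (t :: ts) c = c :: t :: ts from by simp [pvStep, hm]]
    exact ih c (t :: ts) x y r hxy (by simpa using hrest)

-- A successful pass decomposes the word as p ++ x :: y :: r with no pair inside p ++ [x].
theorem pvFindRemove_decomp : ∀ (cs cs' : List Char), pvFindRemove cs = some cs' →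
    ∃ p x y r, cs = p ++ x :: y :: r ∧ cs' = p ++ r ∧ pvMatch x y = true ∧
      pvFindRemove (p ++ [x]) = none := by
  intro cs
  induction cs with
  | nil => intro cs' h; simp [pvFindRemove] at h
  | cons a t ih =>
    intro cs' h
    match t, h with
    | b :: rest, h =>
      by_cases hm : pvMatch a b
      · simp [pvFindRemove, hm] at h
        exact ⟨[], a, b, rest, by simp, by simp [h], hm, by simp [pvFindRemove]⟩
      · simp [pvFindRemove, hm, Option.map_eq_some_iff] at h
        obtain ⟨u, hu, hcs⟩ := h
        obtain ⟨p, x, y, r, hbr, hu', hxy, hnone⟩ := ih u hu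
        refine ⟨a :: p, x, y, r, by simp [hbr], ?_, hxy, ?_⟩
        · rw [← hcs, hu']; simp
        · match p, hbr, hnone with
          | [], hbr, hnone =>
            injection hbr with h1 h2
            subst h1
            simp [pvFindRemove, hm]
          | c :: p', hbr, hnone =>
            injection hbr with h1 h2
            subst h1
            rw [show (a :: (b :: p') ++ [x]) = a :: b :: (p' ++ [x]) from by simp,
                pvFindRemove_cons_none]
            exact ⟨by simp [hm], by simpa using hnone⟩

theorem pv_fold_invariant : ∀ (cs cs' : List Char), pvFindRemove cs = some cs' →
    List.foldl pvStep [] cs = List.foldl pvStep [] cs' := by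
  intro cs cs' h
  obtain ⟨p, x, y, r, hcs, hcs', hxy, hnone⟩ := pvFindRemove_decomp cs cs' h
  subst hcs hcs'
  match p with
  | [] => simp [List.foldl, pvStep, hxy]
  | t :: p' =>
    simp only [List.cons_append, List.foldl, pvStep]
    exact pv_fold_remove p' t [] x y r hxy hnone

theorem pvReduce_eq_fold : ∀ (cs : List Char), pvReduce cs = (List.foldl pvStep [] cs).reverse := by
  intro cs
  induction hn : cs.length using Nat.strong_induction_on generalizing cs with
  | _ n ih =>
    rw [pvReduce]
    split
    · rename_i cs' h
      rw [ih cs'.length (hn ▸ pvFindRemove_length cs cs' h) cs' rfl,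
          pv_fold_invariant cs cs' h]
    · rename_i h
      match cs, h with
      | [], _ => simp
      | t :: cs'', h =>
        rw [List.foldl, show pvStep [] t = [t] from rfl, pv_fold_nomatch cs'' t [] h]
        simp

-- ===== VERDICT (by name: the statement is the Claim_ definition above) =====
theorem corrigir_palavra_spec : Claim_equal_corrigir_palavra := by
  intro s _
  unfold Spec_corrigir_palavra corrigir_palavra corrigir_palavra_alt
  rw [pvReduce_eq_fold]
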